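-- pv_equiv track=rewrite | github.com/andrasfe/specter | specter/incremental_mock.py | _cluster_errors
-- ===== SOURCE A (Python) =====
-- def _cluster_errors(
--     errors: list[tuple[int, str]],
--     gap: int = 10,
-- ) -> list[list[tuple[int, str]]]:
--     """Group errors within `gap` lines of each other into clusters.
--
--     When 20 errors are all in lines 14620-14630, they're one root cause.
--     Treating them as one cluster prevents the LLM from trying each line
--     separately with the same doomed fix.
--     """
--     if not errors:
--         return []
--     sorted_errs = sorted(errors, key=lambda e: e[0])
--     clusters: list[list[tuple[int, str]]] = [[sorted_errs[0]]]
--     for err in sorted_errs[1:]: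
--         if err[0] - clusters[-1][-1][0] <= gap:
--             clusters[-1].append(err)
--         else:
--             clusters.append([err])
--     return clusters
-- ===== SOURCE B (Python) =====
-- def _cluster_errors(
--     errors: list[tuple[int, str]],
--     gap: int = 10,
-- ) -> list[list[tuple[int, str]]]:
--     """Group errors within `gap` lines of each other into clusters.
--
--     Two staged passes over the sorted list: first compute the run-length
--     (size) of every cluster, then cut the sorted list into blocks of
--     exactly those sizes.
--     """
--     s = sorted(errors, key=lambda e: e[0])
--     sizes = []
--     run = 0
--     prev = None
--     for err in s:
--         if run and err[0] - prev > gap: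
--             sizes.append(run)
--             run = 0
--         run += 1
--         prev = err[0]
--     if run:
--         sizes.append(run)
--     out = []
--     pos = 0
--     for k in sizes:
--         out.append(s[pos:pos + k])
--         pos += k
--     return out
-- ===== Notes on version B (the rewrite author's own statement) =====
-- stated objective: alternative
-- what changed: B replaces A's single build-as-you-go loop (append to the last cluster or open a new one) by two staged passes: pass 1 run-length-encodes the cluster sizes from the sorted list, pass 2 reconstructs the clusters by slicing the sorted list into blocks of exactly those sizes.
import Mathlib
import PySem

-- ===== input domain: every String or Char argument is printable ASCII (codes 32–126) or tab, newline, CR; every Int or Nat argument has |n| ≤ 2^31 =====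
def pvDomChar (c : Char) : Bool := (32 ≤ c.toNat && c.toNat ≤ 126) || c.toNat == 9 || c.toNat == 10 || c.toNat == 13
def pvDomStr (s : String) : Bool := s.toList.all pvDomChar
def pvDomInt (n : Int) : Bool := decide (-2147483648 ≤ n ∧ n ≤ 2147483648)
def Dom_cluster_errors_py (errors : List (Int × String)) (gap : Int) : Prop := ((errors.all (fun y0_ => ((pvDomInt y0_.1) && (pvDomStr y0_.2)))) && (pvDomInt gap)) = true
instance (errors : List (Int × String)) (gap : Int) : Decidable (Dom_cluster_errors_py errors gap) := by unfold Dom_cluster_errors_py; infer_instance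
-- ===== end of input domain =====

-- B is an alternative decomposition of the same cost: instead of A's single build-as-you-go
-- loop it first run-length-encodes the cluster sizes from the sorted list, then cuts the
-- sorted list into blocks of those sizes by slicing.

-- ===== PORT A =====
def cluster_errors_py (errors : List (Int × String)) (gap : Int) : List (List (Int × String)) :=
  if errors = [] then []
  else
    match PySem.List.sorted errors (fun e => e.1) with
    | [] => []  -- unreachable: sorted of a nonempty list is nonempty
    | h :: t =>
      -- clusters = [[sorted_errs[0]]]; for err in sorted_errs[1:]: …
      t.foldl (fun clusters err =>
        match clusters.getLast? with
        | some c =>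
          match c.getLast? with
          | some last =>
            if err.1 - last.1 ≤ gap then clusters.dropLast ++ [c ++ [err]]
            else clusters ++ [[err]]
          | none => clusters ++ [[err]]  -- unreachable
        | none => clusters ++ [[err]]    -- unreachable
        ) [[h]]

-- ===== PORT B =====
def cluster_errors_py_alt (errors : List (Int × String)) (gap : Int) : List (List (Int × String)) :=
  let s := PySem.List.sorted errors (fun e => e.1)
  -- pass 1: sizes = []; run = 0; prev = None; for err in s: …
  -- (Python short-circuits `run and err[0] - prev > gap`, so `prev` is only read when
  --  run ≠ 0; `.getD 0` is the dead None case and the conjunction makes it unreachable)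
  let st := s.foldl (fun (st : List Int × Int × Option Int) err =>
      let st := if st.2.1 ≠ 0 ∧ err.1 - st.2.2.getD 0 > gap
                then (st.1 ++ [st.2.1], 0, st.2.2) else st
      (st.1, st.2.1 + 1, some err.1)) ([], 0, none)
  let sizes := if st.2.1 ≠ 0 then st.1 ++ [st.2.1] else st.1
  -- pass 2: out = []; pos = 0; for k in sizes: out.append(s[pos:pos+k]); pos += k
  (sizes.foldl (fun (acc : List (List (Int × String)) × Int) k =>
      (acc.1 ++ [PySem.List.slice s (some acc.2) (some (acc.2 + k))], acc.2 + k)) ([], 0)).1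

-- ===== PRECONDITION & SPEC =====
def Spec_cluster_errors_py (errors : List (Int × String)) (gap : Int) (out : List (List (Int × String))) : Prop := out = cluster_errors_py_alt errors gap
instance (errors : List (Int × String)) (gap : Int) (out : List (List (Int × String))) : Decidable (Spec_cluster_errors_py errors gap out) := by unfold Spec_cluster_errors_py; infer_instance

-- ===== CLAIM =====
def Claim_equal_cluster_errors_py : Prop := ∀ (errors : List (Int × String)) (gap : Int), Dom_cluster_errors_py errors gap → Spec_cluster_errors_py errors gap (cluster_errors_py errors gap)

-- ===== LEMMAS AND PROOFS =====

/-- Reference recursion: first cluster starting at `p`, and the remaining clusters. -/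
def pvGrp (gap : Int) : (Int × String) → List (Int × String) → List (Int × String) × List (List (Int × String))
  | p, [] => ([p], [])
  | p, x :: t =>
    let hr := pvGrp gap x t
    if x.1 - p.1 ≤ gap then (p :: hr.1, hr.2) else ([p], hr.1 :: hr.2)

theorem pvGrp_flat (gap : Int) (t : List (Int × String)) :
    ∀ p, p :: t = (pvGrp gap p t).1 ++ ((pvGrp gap p t).2).flatten := by
  induction t with
  | nil => intro p; rfl
  | cons x t ih =>
    intro p
    simp only [pvGrp]
    split_ifs <;> simp [← ih x]

theorem pvFoldA (gap : Int) (t : List (Int × String)) :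
    ∀ (p : Int × String) (e : List (Int × String)) (cs : List (List (Int × String))),
    t.foldl (fun clusters err =>
        match clusters.getLast? with
        | some c =>
          match c.getLast? with
          | some last =>
            if err.1 - last.1 ≤ gap then clusters.dropLast ++ [c ++ [err]]
            else clusters ++ [[err]]
          | none => clusters ++ [[err]]
        | none => clusters ++ [[err]]
        ) (cs ++ [e ++ [p]])
      = cs ++ (e ++ (pvGrp gap p t).1) :: (pvGrp gap p t).2 := by
  induction t with
  | nil => intro p e cs; simp [pvGrp]
  | cons x t ih =>
    intro p e cs
    have hlast : (cs ++ [e ++ [p]]).getLast? = some (e ++ [p]) := by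
      simp
    have hlast2 : (e ++ [p]).getLast? = some p := by simp
    simp only [List.foldl_cons, hlast, hlast2]
    by_cases hgap : x.1 - p.1 ≤ gap
    · have hdrop : (cs ++ [e ++ [p]]).dropLast = cs := by
        simp
      simp only [hgap, if_true, hdrop]
      rw [ih x (e ++ [p]) cs]
      simp only [pvGrp, if_pos hgap]
      simp
    · simp only [if_neg hgap]
      have := ih x [] (cs ++ [e ++ [p]])
      simp only [List.nil_append] at this
      rw [this]
      simp only [pvGrp, if_neg hgap]
      simp

/-- Pass 1 of B computes the run-lengths of the clusters of `pvGrp`. -/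
theorem pvPass1 (gap : Int) (t : List (Int × String)) :
    ∀ (p : Int × String) (sizes : List Int) (r : Int), 1 ≤ r →
    (let st := t.foldl (fun (st : List Int × Int × Option Int) err =>
        let st := if st.2.1 ≠ 0 ∧ err.1 - st.2.2.getD 0 > gap
                  then (st.1 ++ [st.2.1], 0, st.2.2) else st
        (st.1, st.2.1 + 1, some err.1)) (sizes, r, some p.1)
     if st.2.1 ≠ 0 then st.1 ++ [st.2.1] else st.1)
    = sizes ++ ((r - 1 + ((pvGrp gap p t).1.length : Int)) :: (pvGrp gap p t).2.map (fun c => (c.length : Int))) := by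
  induction t with
  | nil =>
    intro p sizes r hr
    have h0 : r ≠ 0 := by omega
    simp only [List.foldl_nil]
    rw [if_pos h0]
    simp [pvGrp]
  | cons x t ih =>
    intro p sizes r hr
    have hr0 : r ≠ 0 := by omega
    by_cases hgap : x.1 - p.1 ≤ gap
    · have hcond : ¬ (r ≠ 0 ∧ x.1 - p.1 > gap) := by omega
      simp only [List.foldl_cons, Option.getD_some]
      rw [if_neg hcond]
      have := ih x sizes (r + 1) (by omega)
      simp only at this ⊢
      rw [this]
      simp only [pvGrp, if_pos hgap, List.length_cons]
      congr 2
      push_cast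
      ring
    · have hcond : (r ≠ 0 ∧ x.1 - p.1 > gap) := ⟨hr0, by omega⟩
      simp only [List.foldl_cons, Option.getD_some]
      rw [if_pos hcond]
      have := ih x (sizes ++ [r]) (0 + 1) (by omega)
      simp only at this ⊢
      rw [this]
      simp only [pvGrp, if_neg hgap, List.length_singleton, List.map_cons]
      simp
 
/-- Pass 2 of B: slicing a list into blocks of the sizes of its clusters rebuilds the clusters. -/
theorem pvPass2 (s : List (Int × String)) (cs : List (List (Int × String))) :
    ∀ (pre : List (Int × String)) (out : List (List (Int × String))),
    s = pre ++ cs.flatten →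
    ((cs.map (fun c => (c.length : Int))).foldl (fun (acc : List (List (Int × String)) × Int) k =>
        (acc.1 ++ [PySem.List.slice s (some acc.2) (some (acc.2 + k))], acc.2 + k)) (out, (pre.length : Int))).1
    = out ++ cs := by
  induction cs with
  | nil => intro pre out _; simp
  | cons c cs ih =>
    intro pre out hs
    simp only [List.map_cons, List.foldl_cons]
    have hslice : PySem.List.slice s (some (pre.length : Int)) (some ((pre.length : Int) + (c.length : Int))) = c := by
      rw [PySem.List.slice_natCast_add, hs]
      simp only [List.flatten_cons]
      rw [List.drop_left, List.take_left]
    rw [hslice]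
    have hlen : ((pre.length : Int) + (c.length : Int)) = ((pre ++ c).length : Int) := by
      simp
    rw [hlen, ih (pre ++ c) (out ++ [c]) (by simp [hs])]
    simp

-- ===== VERDICT =====
theorem cluster_errors_py_spec : Claim_equal_cluster_errors_py := by
  intro errors gap _
  unfold Spec_cluster_errors_py cluster_errors_py cluster_errors_py_alt
  by_cases hnil : errors = []
  · subst hnil; rfl
  · rw [if_neg hnil]
    cases hs : PySem.List.sorted errors (fun e => e.1) with
    | nil => exact absurd ((PySem.List.sorted_eq_nil_iff _ _ _).mp hs) hnil
    | cons h t =>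
      simp only [hs]
      -- A side
      have hA := pvFoldA gap t h [] []
      simp only [List.nil_append] at hA
      rw [hA]
      -- B side, pass 1: the first step opens the run (run = 0, the flush test is false)
      simp only [List.foldl_cons, ne_eq, not_true_eq_false, false_and, if_false,
        List.nil_append, zero_add]
      have h1 := pvPass1 gap t h [] 1 (le_refl 1)
      simp only at h1
      rw [h1]
      -- pass 2
      have hflat : h :: t = [] ++ ((pvGrp gap h t).1 :: (pvGrp gap h t).2).flatten := by
        simpa using pvGrp_flat gap t h
      have h2 := pvPass2 (h :: t) ((pvGrp gap h t).1 :: (pvGrp gap h t).2) [] [] hflat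
      simp only [List.map_cons, List.nil_append, List.length_nil, Nat.cast_zero] at h2
      have harith : (1 : Int) - 1 + ((pvGrp gap h t).1.length : Int) = ((pvGrp gap h t).1.length : Int) := by ring
      rw [List.nil_append, harith]
      exact h2.symm
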